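-- pv_equiv track=rewrite | github.com/GodDB/kma-api | kma_bulk_download.py | split_kma_text
-- ===== SOURCE A (Python) =====
-- def split_kma_text(text: str) -> tuple[list[str], list[str], list[str]]:
--     header_lines: list[str] = []
--     data_lines: list[str] = []
--     footer_lines: list[str] = []
--     seen_data = False
--
--     for raw_line in text.splitlines():
--         line = raw_line.rstrip("\r")
--         if not line:
--             continue
--
--         if line.startswith("#7777END"):
--             footer_lines.append(line)
--             continue
--
--         if line.startswith("#") and not seen_data:
--             header_lines.append(line)
--             continue
--
--         if line.startswith("#"):
--             footer_lines.append(line)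
--             continue
--
--         seen_data = True
--         data_lines.append(line)
--
--     return header_lines, data_lines, footer_lines
-- ===== SOURCE B (Python) =====
-- def split_kma_text(text: str) -> tuple[list[str], list[str], list[str]]:
--     lines = [l for l in (raw.rstrip("\r") for raw in text.splitlines()) if l]
--     pivot = next((i for i, l in enumerate(lines) if not l.startswith("#")), len(lines))
--     pre, post = lines[:pivot], lines[pivot:]
--     header = [l for l in pre if not l.startswith("#7777END")]
--     data = [l for l in post if not l.startswith("#")]
--     footer = [l for l in pre if l.startswith("#7777END")] + [l for l in post if l.startswith("#")]
--     return header, data, footer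
-- ===== Notes on version B (the rewrite author's own statement) =====
-- stated objective: alternative
-- what changed: Replaced the single stateful scan with a seen_data flag by boundary-finding: compute the index of the first non-comment line, then classify the pre-pivot and post-pivot segments with stateless filters.
import Mathlib
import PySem

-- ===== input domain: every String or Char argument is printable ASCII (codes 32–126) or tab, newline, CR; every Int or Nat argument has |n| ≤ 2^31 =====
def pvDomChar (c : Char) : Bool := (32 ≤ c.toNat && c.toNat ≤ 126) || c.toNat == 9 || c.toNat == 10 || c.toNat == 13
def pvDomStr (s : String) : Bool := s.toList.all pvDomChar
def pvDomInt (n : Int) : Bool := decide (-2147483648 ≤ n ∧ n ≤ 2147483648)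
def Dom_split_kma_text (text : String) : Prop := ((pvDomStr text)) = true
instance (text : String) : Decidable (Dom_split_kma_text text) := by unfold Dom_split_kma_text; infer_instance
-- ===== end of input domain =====

-- B replaces A's stateful single pass (seen_data flag) by finding the first non-'#' line and
-- classifying the two segments with stateless filters (objective: alternative decomposition).

-- shared helper: Python's raw_line.rstrip("\r") — drop trailing '\r' characters (exact: rstrip with
-- an explicit char set removes exactly the trailing characters from that set)
def pvRstripCR (s : String) : String := String.ofList ((s.toList.reverse.dropWhile (fun c => c == '\r')).reverse)

-- ===== PORT A =====
-- the body of A's loop after the `if not line: continue` guard (the branch cascade, in A's order)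
def pvStepC (acc : (List String × List String × List String) × Bool) (line : String) :
    (List String × List String × List String) × Bool :=
  if PySem.Str.startswith line "#7777END" then
    ((acc.1.1, acc.1.2.1, acc.1.2.2 ++ [line]), acc.2)
  else if PySem.Str.startswith line "#" && !acc.2 then
    ((acc.1.1 ++ [line], acc.1.2.1, acc.1.2.2), acc.2)
  else if PySem.Str.startswith line "#" then
    ((acc.1.1, acc.1.2.1, acc.1.2.2 ++ [line]), acc.2)
  else
    ((acc.1.1, acc.1.2.1 ++ [line], acc.1.2.2), true)

-- one iteration of A's loop: rstrip, skip empty, then the cascade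
def pvStepA (acc : (List String × List String × List String) × Bool) (raw : String) :
    (List String × List String × List String) × Bool :=
  let line := pvRstripCR raw
  if line == "" then acc else pvStepC acc line

def split_kma_text (text : String) : List String × List String × List String :=
  ((PySem.Str.splitlines text).foldl pvStepA (([], [], []), false)).1

-- ===== PORT B =====
def split_kma_text_alt (text : String) : List String × List String × List String :=
  let lines := (((PySem.Str.splitlines text).map pvRstripCR).filter (fun l => !(l == "")))
  let pivot := lines.findIdx (fun l => !PySem.Str.startswith l "#")
  let pre := lines.take pivot
  let post := lines.drop pivot
  (pre.filter (fun l => !PySem.Str.startswith l "#7777END"),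
   post.filter (fun l => !PySem.Str.startswith l "#"),
   pre.filter (fun l => PySem.Str.startswith l "#7777END")
     ++ post.filter (fun l => PySem.Str.startswith l "#"))

-- ===== PRECONDITION & SPEC =====
def Spec_split_kma_text (text : String) (out : List String × List String × List String) : Prop := out = split_kma_text_alt text
instance (text : String) (out : List String × List String × List String) : Decidable (Spec_split_kma_text text out) := by unfold Spec_split_kma_text; infer_instance

-- ===== CLAIM (what is proved, stated in full; the proofs are below) =====
def Claim_equal_split_kma_text : Prop := ∀ (text : String), Dom_split_kma_text text → Spec_split_kma_text text (split_kma_text text)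

-- ===== LEMMAS AND PROOFS =====

-- "#7777END" prefix implies "#" prefix
lemma pv_QP (l : List Char) (h : PySem.Chars.startswith l ['#', '7', '7', '7', '7', 'E', 'N', 'D'] = true) :
    PySem.Chars.startswith l ['#'] = true := by
  rw [PySem.Chars.startswith_iff] at h ⊢
  exact List.IsPrefix.trans ⟨['7', '7', '7', '7', 'E', 'N', 'D'], rfl⟩ h

-- folding A's loop over raw lines = folding the cascade over the rstripped, nonempty lines
lemma pv_foldA_eq (l : List String) (acc : (List String × List String × List String) × Bool) :
    l.foldl pvStepA acc = ((l.map pvRstripCR).filter (fun x => !(x == ""))).foldl pvStepC acc := by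
  induction l generalizing acc with
  | nil => rfl
  | cons x xs ih =>
    simp only [List.foldl_cons, List.map_cons, List.filter_cons, pvStepA]
    by_cases hx : pvRstripCR x == ""
    · simp [hx, ih]
    · simp only [hx] at *
      simp [ih]

-- after seen_data is set, the cascade sends '#'-lines to footer and the rest to data
lemma pv_fold_true (l : List String) (h d f : List String) :
    l.foldl pvStepC ((h, d, f), true)
      = ((h, d ++ l.filter (fun x => !PySem.Str.startswith x "#"),
              f ++ l.filter (fun x => PySem.Str.startswith x "#")), true) := by
  induction l generalizing d f with
  | nil => simp
  | cons x xs ih =>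
    simp only [List.foldl_cons, List.filter_cons]
    by_cases hQ : PySem.Chars.startswith x.toList ['#', '7', '7', '7', '7', 'E', 'N', 'D'] = true
    · have hP := pv_QP x.toList hQ
      simp [pvStepC, hQ, hP, ih]
    · by_cases hP : PySem.Chars.startswith x.toList ['#'] = true
      · simp [pvStepC, hQ, hP, ih]
      · simp [pvStepC, hQ, hP, ih]

-- before seen_data, the result is the pivot decomposition
lemma pv_fold_false (l : List String) (h d f : List String) :
    (l.foldl pvStepC ((h, d, f), false)).1
      = (h ++ (l.take (l.findIdx (fun x => !PySem.Str.startswith x "#"))).filter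
              (fun x => !PySem.Str.startswith x "#7777END"),
         d ++ (l.drop (l.findIdx (fun x => !PySem.Str.startswith x "#"))).filter
              (fun x => !PySem.Str.startswith x "#"),
         f ++ (l.take (l.findIdx (fun x => !PySem.Str.startswith x "#"))).filter
              (fun x => PySem.Str.startswith x "#7777END")
           ++ (l.drop (l.findIdx (fun x => !PySem.Str.startswith x "#"))).filter
              (fun x => PySem.Str.startswith x "#")) := by
  induction l generalizing h d f with
  | nil => simp
  | cons x xs ih =>
    by_cases hP : PySem.Chars.startswith x.toList ['#'] = true
    · have hfi : (x :: xs).findIdx (fun x => !PySem.Chars.startswith x.toList ['#'])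
          = xs.findIdx (fun x => !PySem.Chars.startswith x.toList ['#']) + 1 := by
        simp [List.findIdx_cons, hP]
      by_cases hQ : PySem.Chars.startswith x.toList ['#', '7', '7', '7', '7', 'E', 'N', 'D'] = true
      · simp [List.foldl_cons, pvStepC, hQ, hfi, ih]
      · simp [List.foldl_cons, pvStepC, hQ, hP, hfi, ih]
    · have hQ : ¬ PySem.Chars.startswith x.toList ['#', '7', '7', '7', '7', 'E', 'N', 'D'] = true :=
        fun h => hP (pv_QP x.toList h)
      have hfi : (x :: xs).findIdx (fun x => !PySem.Chars.startswith x.toList ['#']) = 0 := by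
        simp [List.findIdx_cons, hP]
      simp [List.foldl_cons, pvStepC, hQ, hP, hfi, pv_fold_true]

-- ===== VERDICT (by name: the statement is the Claim_ definition above) =====
theorem split_kma_text_spec : Claim_equal_split_kma_text := by
  intro text _
  show split_kma_text text = split_kma_text_alt text
  unfold split_kma_text split_kma_text_alt
  rw [pv_foldA_eq, pv_fold_false]
  simp
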